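-- pv_equiv track=rewrite | github.com/clementinec/thermBAL | cases/office_topology_compare/generate_study.py | bfs_depth
-- ===== SOURCE A (Python) =====
-- from collections import deque
-- from typing import Dict, Iterable, List, Set, Tuple
--
-- Coord = Tuple[int, int]
--
-- def neighbor_cells(cell: Coord) -> List[Coord]:
--     col, row = cell
--     return [(col + 1, row), (col - 1, row), (col, row + 1), (col, row - 1)]
--
-- def bfs_depth(active_cells: Set[Coord], seed_cells: Iterable[Coord]) -> Dict[Coord, int]:
--     depths = {cell: 999 for cell in active_cells}
--     queue: deque[Coord] = deque()
--     for cell in seed_cells: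
--         if cell in active_cells and depths[cell] > 0:
--             depths[cell] = 0
--             queue.append(cell)
--     while queue:
--         current = queue.popleft()
--         current_depth = depths[current]
--         for nxt in neighbor_cells(current):
--             if nxt in active_cells and depths[nxt] > current_depth + 1:
--                 depths[nxt] = current_depth + 1
--                 queue.append(nxt)
--     return depths
-- ===== SOURCE B (Python) =====
-- def bfs_depth(active_cells, seed_cells):
--     depths = {cell: 999 for cell in active_cells}
--     frontier = []
--     for cell in seed_cells:
--         if cell in active_cells and depths[cell] > 0:
--             depths[cell] = 0
--             frontier.append(cell)
--     d = 0
--     while frontier: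
--         next_frontier = []
--         for col, row in frontier:
--             for nxt in ((col + 1, row), (col - 1, row), (col, row + 1), (col, row - 1)):
--                 if nxt in active_cells and depths[nxt] > d + 1:
--                     depths[nxt] = d + 1
--                     next_frontier.append(nxt)
--         frontier = next_frontier
--         d += 1
--     return depths
-- ===== Notes on version B (the rewrite author's own statement) =====
-- stated objective: alternative
-- what changed: Replaces the FIFO-deque BFS that pops one cell at a time and re-reads its depth from the dict with a level-synchronous BFS that expands whole frontier lists and carries the current depth as an explicit level counter.
import Mathlib
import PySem

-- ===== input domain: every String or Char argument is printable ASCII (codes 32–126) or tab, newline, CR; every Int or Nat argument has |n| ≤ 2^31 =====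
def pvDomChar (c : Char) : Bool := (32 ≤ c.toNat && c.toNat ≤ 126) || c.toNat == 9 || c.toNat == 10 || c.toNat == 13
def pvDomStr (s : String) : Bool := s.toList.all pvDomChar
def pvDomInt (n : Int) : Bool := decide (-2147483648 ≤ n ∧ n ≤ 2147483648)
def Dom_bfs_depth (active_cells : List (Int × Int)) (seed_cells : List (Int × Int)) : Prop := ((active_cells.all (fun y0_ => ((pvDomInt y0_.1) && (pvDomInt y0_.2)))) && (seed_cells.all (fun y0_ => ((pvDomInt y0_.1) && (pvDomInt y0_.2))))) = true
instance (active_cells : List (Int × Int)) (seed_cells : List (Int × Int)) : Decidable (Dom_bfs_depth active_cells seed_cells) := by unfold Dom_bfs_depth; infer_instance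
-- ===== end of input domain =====

-- B replaces A's FIFO-deque BFS (pop one cell, re-read its depth from the dict) by a
-- level-synchronous BFS expanding whole frontier lists with an explicit level counter (objective: alternative).

-- ===== PORT A =====

-- the relaxation step shared verbatim by both Pythons' inner `if` statement
def pvRelax (active : List (Int × Int)) (d : Int)
    (st : PySem.Dict (Int × Int) Int × List (Int × Int)) (nxt : Int × Int) :
    PySem.Dict (Int × Int) Int × List (Int × Int) :=
  if active.contains nxt && decide (st.1.getD nxt 0 > d + 1) then
    (st.1.insert nxt (d + 1), st.2 ++ [nxt])
  else st

-- {cell: 999 for cell in active_cells}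
def pvInit (active : List (Int × Int)) : PySem.Dict (Int × Int) Int :=
  active.foldl (fun dd c => dd.insert c 999) PySem.Dict.empty

-- the seed loop, identical in Source A and Source B
def pvSeed (active : List (Int × Int)) (seeds : List (Int × Int)) :
    PySem.Dict (Int × Int) Int × List (Int × Int) :=
  seeds.foldl
    (fun st c =>
      if active.contains c && decide (st.1.getD c 0 > 0) then (st.1.insert c 0, st.2 ++ [c])
      else st)
    (pvInit active, [])

-- helper for the totality guard of the while-loops (guard only: on real runs it always passes)
def pvSum (dd : PySem.Dict (Int × Int) Int) : Nat :=
  (dd.items.map (fun p => p.2.toNat)).sum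

def pvNeighbors (c : Int × Int) : List (Int × Int) :=
  [(c.1 + 1, c.2), (c.1 - 1, c.2), (c.1, c.2 + 1), (c.1, c.2 - 1)]

-- A's `while queue:` loop: pop left, current_depth = depths[current], relax the 4 neighbours
def pvLoopA (active : List (Int × Int)) (depths : PySem.Dict (Int × Int) Int)
    (queue : List (Int × Int)) : PySem.Dict (Int × Int) Int :=
  match queue with
  | [] => depths
  | cur :: rest =>
      let st := (pvNeighbors cur).foldl (pvRelax active (depths.getD cur 0)) (depths, rest)
      if h : st.2.length + pvSum st.1 < (cur :: rest).length + pvSum depths then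
        pvLoopA active st.1 st.2
      else st.1
termination_by queue.length + pvSum depths
decreasing_by exact h

def bfs_depth (active_cells : List (Int × Int)) (seed_cells : List (Int × Int)) :
    List (Int × Int × Int) :=
  let s := pvSeed active_cells seed_cells
  (pvLoopA active_cells s.1 s.2).items.map (fun p => (p.1.1, p.1.2, p.2))

-- ===== PORT B =====

-- expand one whole frontier at level d, collecting the next frontier
def pvExpandAll (active : List (Int × Int)) (d : Int) (frontier : List (Int × Int))
    (depths : PySem.Dict (Int × Int) Int) : PySem.Dict (Int × Int) Int × List (Int × Int) :=
  frontier.foldl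
    (fun s cell =>
      [(cell.1 + 1, cell.2), (cell.1 - 1, cell.2), (cell.1, cell.2 + 1), (cell.1, cell.2 - 1)].foldl
        (pvRelax active d) s)
    (depths, [])

-- B's `while frontier:` loop with the explicit level counter d
def pvLoopB (active : List (Int × Int)) (depths : PySem.Dict (Int × Int) Int)
    (frontier : List (Int × Int)) (d : Int) : PySem.Dict (Int × Int) Int :=
  if frontier.isEmpty then depths
  else
    let st := pvExpandAll active d frontier depths
    if h : st.2.length + pvSum st.1 < frontier.length + pvSum depths then
      pvLoopB active st.1 st.2 (d + 1)
    else st.1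
termination_by frontier.length + pvSum depths
decreasing_by exact h

def bfs_depth_alt (active_cells : List (Int × Int)) (seed_cells : List (Int × Int)) :
    List (Int × Int × Int) :=
  let s := pvSeed active_cells seed_cells
  (pvLoopB active_cells s.1 s.2 0).items.map (fun p => (p.1.1, p.1.2, p.2))

-- ===== PRECONDITION & SPEC =====
def Spec_bfs_depth (active_cells : List (Int × Int)) (seed_cells : List (Int × Int)) (out : List (Int × Int × Int)) : Prop := out = bfs_depth_alt active_cells seed_cells
instance (active_cells : List (Int × Int)) (seed_cells : List (Int × Int)) (out : List (Int × Int × Int)) : Decidable (Spec_bfs_depth active_cells seed_cells out) := by unfold Spec_bfs_depth; infer_instance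

-- ===== CLAIM (what is proved, stated in full; the proofs are below) =====
def Claim_equal_bfs_depth : Prop := ∀ (active_cells : List (Int × Int)) (seed_cells : List (Int × Int)), Dom_bfs_depth active_cells seed_cells → Spec_bfs_depth active_cells seed_cells (bfs_depth active_cells seed_cells)

-- ===== LEMMAS AND PROOFS =====

theorem pv_sum_replace (k : Int × Int) (v : Int) :
    ∀ (l : List ((Int × Int) × Int)) (old : Int), (k, old) ∈ l → (l.map Prod.fst).Nodup →
      ((l.map (fun p => if p.1 == k then (k, v) else p)).map (fun p => p.2.toNat)).sum + old.toNat
        = (l.map (fun p => p.2.toNat)).sum + v.toNat := by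
  intro l
  induction l with
  | nil => intro old h; simp at h
  | cons hd tl ih =>
      intro old hmem hnd
      simp only [List.map_cons, List.nodup_cons] at hnd
      rcases List.mem_cons.mp hmem with heq | htl
      · subst heq
        have htlid : tl.map (fun p => if p.1 == k then (k, v) else p) = tl := by
          have : ∀ p ∈ tl, (if p.1 == k then (k, v) else p) = id p := by
            intro p hp
            have hne : p.1 ≠ k := by
              intro he; exact hnd.1 (by simpa [he] using List.mem_map_of_mem (f := Prod.fst) hp)
            simp [hne]
          rw [List.map_congr_left this, List.map_id]
        simp only [List.map_cons, List.sum_cons, htlid]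
        norm_num
        omega
      · have hk : k ∈ tl.map Prod.fst := by
          simpa using List.mem_map_of_mem (f := Prod.fst) htl
        have hne : hd.1 ≠ k := by intro he; exact hnd.1 (he ▸ hk)
        have := ih old htl hnd.2
        simp only [List.map_cons, List.sum_cons]
        rw [if_neg (by simp [hne])]
        omega

theorem pvSum_insert (dd : PySem.Dict (Int × Int) Int) (k : Int × Int) (v : Int)
    (hnd : dd.keys.Nodup) (hc : dd.contains k = true) :
    pvSum (dd.insert k v) + (dd.getD k 0).toNat = pvSum dd + v.toNat := by
  have hsome : (dd.get? k).isSome := by rw [← PySem.Dict.contains_eq_isSome_get?]; exact hc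
  obtain ⟨old, hold⟩ := Option.isSome_iff_exists.mp hsome
  have hmem : (k, old) ∈ dd.items := PySem.Dict.mem_items_of_get?_eq_some dd hold
  have hgd : dd.getD k 0 = old := PySem.Dict.getD_of_get?_eq_some dd 0 hold
  have hnd' : (dd.items.map Prod.fst).Nodup := by
    simpa [PySem.Dict.keys] using hnd
  rw [hgd]
  unfold pvSum
  rw [PySem.Dict.items_insert_of_contains dd v hc]
  exact pv_sum_replace k v dd.items old hmem hnd'

-- a fold whose step touches the list component only by appending factors through the empty accumulator
theorem pv_foldl_acc {α : Type}
    (f : PySem.Dict (Int × Int) Int × List (Int × Int) → α → PySem.Dict (Int × Int) Int × List (Int × Int))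
    (hf : ∀ D q x, f (D, q) x = ((f (D, []) x).1, q ++ (f (D, []) x).2)) :
    ∀ (l : List α) (D : PySem.Dict (Int × Int) Int) (q : List (Int × Int)),
      l.foldl f (D, q) = ((l.foldl f (D, []) ).1, q ++ (l.foldl f (D, []) ).2) := by
  intro l
  induction l with
  | nil => intro D q; simp
  | cons x l ih =>
      intro D q
      simp only [List.foldl_cons]
      rw [hf D q x, ih (f (D, []) x).1 (q ++ (f (D, []) x).2), hf D [] x]
      simp only [List.nil_append]
      rw [ih (f (D, []) x).1 ((f (D, []) x).2)]
      simp [List.append_assoc]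

theorem pvRelax_hf (active : List (Int × Int)) (d : Int) :
    ∀ (D : PySem.Dict (Int × Int) Int) (q : List (Int × Int)) (x : Int × Int),
      pvRelax active d (D, q) x
        = ((pvRelax active d (D, []) x).1, q ++ (pvRelax active d (D, []) x).2) := by
  intro D q x
  unfold pvRelax
  by_cases h : (active.contains x && decide (D.getD x 0 > d + 1)) = true
  · rw [if_pos h, if_pos h]; simp
  · rw [if_neg h, if_neg h]; simp

theorem pvRelax_fold_acc (active : List (Int × Int)) (d : Int)
    (ns : List (Int × Int)) (D : PySem.Dict (Int × Int) Int) (q : List (Int × Int)) :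
    ns.foldl (pvRelax active d) (D, q)
      = ((ns.foldl (pvRelax active d) (D, []) ).1, q ++ (ns.foldl (pvRelax active d) (D, []) ).2) :=
  pv_foldl_acc (pvRelax active d) (pvRelax_hf active d) ns D q

-- per-cell expansion step of B
def pvCell (active : List (Int × Int)) (d : Int)
    (s : PySem.Dict (Int × Int) Int × List (Int × Int)) (cell : Int × Int) :
    PySem.Dict (Int × Int) Int × List (Int × Int) :=
  [(cell.1 + 1, cell.2), (cell.1 - 1, cell.2), (cell.1, cell.2 + 1), (cell.1, cell.2 - 1)].foldl
    (pvRelax active d) s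

theorem pvExpandAll_eq_foldl (active : List (Int × Int)) (d : Int)
    (frontier : List (Int × Int)) (depths : PySem.Dict (Int × Int) Int) :
    pvExpandAll active d frontier depths = frontier.foldl (pvCell active d) (depths, []) := rfl

theorem pvCell_hf (active : List (Int × Int)) (d : Int) :
    ∀ (D : PySem.Dict (Int × Int) Int) (q : List (Int × Int)) (x : Int × Int),
      pvCell active d (D, q) x = ((pvCell active d (D, []) x).1, q ++ (pvCell active d (D, []) x).2) := by
  intro D q x
  unfold pvCell
  exact pvRelax_fold_acc active d _ D q

theorem pvCell_fold_acc (active : List (Int × Int)) (d : Int)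
    (cells : List (Int × Int)) (D : PySem.Dict (Int × Int) Int) (q : List (Int × Int)) :
    cells.foldl (pvCell active d) (D, q)
      = ((cells.foldl (pvCell active d) (D, []) ).1, q ++ (cells.foldl (pvCell active d) (D, []) ).2) :=
  pv_foldl_acc (pvCell active d) (pvCell_hf active d) cells D q

-- one relax step: keys stay nodup and the measure |acc| + pvSum does not grow (for 0 ≤ d)
theorem pvRelax_step_mu (active : List (Int × Int)) (d : Int) (hd : 0 ≤ d)
    (st : PySem.Dict (Int × Int) Int × List (Int × Int)) (x : Int × Int)
    (hnd : st.1.keys.Nodup) :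
    (pvRelax active d st x).1.keys.Nodup ∧
      (pvRelax active d st x).2.length + pvSum (pvRelax active d st x).1
        ≤ st.2.length + pvSum st.1 := by
  unfold pvRelax
  by_cases h : (active.contains x && decide (st.1.getD x 0 > d + 1)) = true
  · rw [if_pos h]
    have hgt : st.1.getD x 0 > d + 1 := by
      have := (Bool.and_eq_true _ _).mp h
      exact of_decide_eq_true this.2
    have hc : st.1.contains x = true := by
      by_contra hnc
      have hf : st.1.contains x = false := by
        cases hcc : st.1.contains x
        · rfl
        · exact absurd hcc hnc
      have : st.1.getD x 0 = 0 := PySem.Dict.getD_of_not_contains st.1 0 hf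
      omega
    refine ⟨PySem.Dict.nodup_keys_insert _ _ _ hnd, ?_⟩
    have hins := pvSum_insert st.1 x (d + 1) hnd hc
    simp only [List.length_append, List.length_cons, List.length_nil]
    omega
  · rw [if_neg h]
    exact ⟨hnd, le_refl _⟩

theorem pvRelax_fold_mu (active : List (Int × Int)) (d : Int) (hd : 0 ≤ d) :
    ∀ (ns : List (Int × Int)) (st : PySem.Dict (Int × Int) Int × List (Int × Int)),
      st.1.keys.Nodup →
      (ns.foldl (pvRelax active d) st).1.keys.Nodup ∧
        (ns.foldl (pvRelax active d) st).2.length + pvSum (ns.foldl (pvRelax active d) st).1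
          ≤ st.2.length + pvSum st.1 := by
  intro ns
  induction ns with
  | nil => intro st h; exact ⟨h, le_refl _⟩
  | cons x ns ih =>
      intro st h
      have h1 := pvRelax_step_mu active d hd st x h
      have h2 := ih (pvRelax active d st x) h1.1
      simp only [List.foldl_cons]
      exact ⟨h2.1, le_trans h2.2 h1.2⟩

theorem pvCell_fold_mu (active : List (Int × Int)) (d : Int) (hd : 0 ≤ d) :
    ∀ (cells : List (Int × Int)) (st : PySem.Dict (Int × Int) Int × List (Int × Int)),
      st.1.keys.Nodup →
      (cells.foldl (pvCell active d) st).1.keys.Nodup ∧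
        (cells.foldl (pvCell active d) st).2.length + pvSum (cells.foldl (pvCell active d) st).1
          ≤ st.2.length + pvSum st.1 := by
  intro cells
  induction cells with
  | nil => intro st h; exact ⟨h, le_refl _⟩
  | cons c cells ih =>
      intro st h
      have h1 : (pvCell active d st c).1.keys.Nodup ∧
          (pvCell active d st c).2.length + pvSum (pvCell active d st c).1
            ≤ st.2.length + pvSum st.1 :=
        pvRelax_fold_mu active d hd [(c.1 + 1, c.2), (c.1 - 1, c.2), (c.1, c.2 + 1), (c.1, c.2 - 1)] st h
      have h2 := ih (pvCell active d st c) h1.1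
      simp only [List.foldl_cons]
      exact ⟨h2.1, le_trans h2.2 h1.2⟩

-- V1: a value already ≤ d+1 is never touched by relaxation at level d
theorem pvRelax_fold_V1 (active : List (Int × Int)) (d : Int) (c : Int × Int) :
    ∀ (ns : List (Int × Int)) (st : PySem.Dict (Int × Int) Int × List (Int × Int)),
      st.1.getD c 0 ≤ d + 1 →
      (ns.foldl (pvRelax active d) st).1.getD c 0 = st.1.getD c 0 := by
  intro ns
  induction ns with
  | nil => intro st _; rfl
  | cons x ns ih =>
      intro st hle
      have hstep : (pvRelax active d st x).1.getD c 0 = st.1.getD c 0 := by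
        unfold pvRelax
        by_cases h : (active.contains x && decide (st.1.getD x 0 > d + 1)) = true
        · have hgt : st.1.getD x 0 > d + 1 := by
            have := (Bool.and_eq_true _ _).mp h
            exact of_decide_eq_true this.2
          have hne : c ≠ x := by intro he; subst he; omega
          rw [if_pos h]
          exact PySem.Dict.getD_insert_of_ne st.1 (d + 1) 0 hne
        · rw [if_neg h]
      simp only [List.foldl_cons]
      rw [ih (pvRelax active d st x) (by rw [hstep]; exact hle), hstep]

-- V2: every cell the relaxation appended carries value d+1 in the final dict
theorem pvRelax_fold_V2 (active : List (Int × Int)) (d : Int) :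
    ∀ (ns : List (Int × Int)) (st : PySem.Dict (Int × Int) Int × List (Int × Int)) (x : Int × Int),
      x ∈ (ns.foldl (pvRelax active d) st).2 →
      x ∈ st.2 ∨ (ns.foldl (pvRelax active d) st).1.getD x 0 = d + 1 := by
  intro ns
  induction ns with
  | nil => intro st x hx; exact Or.inl hx
  | cons n ns ih =>
      intro st x hx
      simp only [List.foldl_cons] at hx ⊢
      rcases ih (pvRelax active d st n) x hx with hmem | hval
      · by_cases h : (active.contains n && decide (st.1.getD n 0 > d + 1)) = true
        · have hstep : pvRelax active d st n = (st.1.insert n (d + 1), st.2 ++ [n]) := by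
            unfold pvRelax; rw [if_pos h]
          rw [hstep] at hmem
          rcases List.mem_append.mp hmem with h1 | h2
          · exact Or.inl h1
          · right
            have hx2 : x = n := by simpa using h2
            subst hx2
            have hv : (st.1.insert x (d + 1)).getD x 0 = d + 1 :=
              PySem.Dict.getD_insert_self st.1 x (d + 1) 0
            have hV1 := pvRelax_fold_V1 active d x ns (pvRelax active d st x)
              (by rw [hstep]; simp only [hv]; exact le_refl _)
            rw [hV1, hstep, hv]
        · have hstep : pvRelax active d st n = st := by
            unfold pvRelax; rw [if_neg h]
          rw [hstep] at hmem
          exact Or.inl hmem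
      · exact Or.inr hval

-- seed phase: keys distinct, every queued cell has depth 0
theorem pvSeedAux (active : List (Int × Int)) :
    ∀ (seeds : List (Int × Int)) (st : PySem.Dict (Int × Int) Int × List (Int × Int)),
      st.1.keys.Nodup → (∀ c ∈ st.2, st.1.getD c 0 = 0) →
      (seeds.foldl
          (fun st c =>
            if active.contains c && decide (st.1.getD c 0 > 0) then (st.1.insert c 0, st.2 ++ [c])
            else st) st).1.keys.Nodup ∧
        ∀ c ∈ (seeds.foldl
          (fun st c =>
            if active.contains c && decide (st.1.getD c 0 > 0) then (st.1.insert c 0, st.2 ++ [c])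
            else st) st).2,
          (seeds.foldl
            (fun st c =>
              if active.contains c && decide (st.1.getD c 0 > 0) then (st.1.insert c 0, st.2 ++ [c])
              else st) st).1.getD c 0 = 0 := by
  intro seeds
  induction seeds with
  | nil => intro st h1 h2; exact ⟨h1, h2⟩
  | cons s seeds ih =>
      intro st h1 h2
      simp only [List.foldl_cons]
      by_cases h : (active.contains s && decide (st.1.getD s 0 > 0)) = true
      · rw [if_pos h]
        refine ih (st.1.insert s 0, st.2 ++ [s]) (PySem.Dict.nodup_keys_insert _ _ _ h1) ?_
        intro c hc
        rw [PySem.Dict.getD_insert]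
        by_cases hcs : c = s
        · rw [if_pos hcs]
        · rw [if_neg hcs]
          rcases List.mem_append.mp hc with h3 | h4
          · exact h2 c h3
          · exact absurd (by simpa using h4) hcs
      · rw [if_neg h]
        exact ih st h1 h2

theorem pvSeed_inv (active : List (Int × Int)) (seeds : List (Int × Int)) :
    (pvSeed active seeds).1.keys.Nodup ∧
      ∀ c ∈ (pvSeed active seeds).2, (pvSeed active seeds).1.getD c 0 = 0 := by
  unfold pvSeed
  refine pvSeedAux active seeds (pvInit active, []) ?_ (by intro c hc; simp at hc)
  exact PySem.Dict.nodup_keys_foldl_insert active (fun _ _ => 999) PySem.Dict.empty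
    PySem.Dict.nodup_keys_empty

-- one-step unfolding lemmas for the two loops
theorem pvLoopA_nil (active : List (Int × Int)) (D : PySem.Dict (Int × Int) Int) :
    pvLoopA active D [] = D := by rw [pvLoopA]

theorem pvLoopA_cons (active : List (Int × Int)) (D : PySem.Dict (Int × Int) Int)
    (cur : Int × Int) (rest : List (Int × Int))
    (h : ((pvNeighbors cur).foldl (pvRelax active (D.getD cur 0)) (D, rest)).2.length
          + pvSum ((pvNeighbors cur).foldl (pvRelax active (D.getD cur 0)) (D, rest)).1
        < (cur :: rest).length + pvSum D) :
    pvLoopA active D (cur :: rest)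
      = pvLoopA active ((pvNeighbors cur).foldl (pvRelax active (D.getD cur 0)) (D, rest)).1
          ((pvNeighbors cur).foldl (pvRelax active (D.getD cur 0)) (D, rest)).2 := by
  rw [pvLoopA]
  simp only [dif_pos h]

theorem pvLoopB_nil (active : List (Int × Int)) (D : PySem.Dict (Int × Int) Int) (d : Int) :
    pvLoopB active D [] d = D := by rw [pvLoopB]; rfl

theorem pvLoopB_step (active : List (Int × Int)) (D : PySem.Dict (Int × Int) Int)
    (frontier : List (Int × Int)) (d : Int) (hne : frontier ≠ [])
    (h : (pvExpandAll active d frontier D).2.length + pvSum (pvExpandAll active d frontier D).1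
        < frontier.length + pvSum D) :
    pvLoopB active D frontier d
      = pvLoopB active (pvExpandAll active d frontier D).1 (pvExpandAll active d frontier D).2
          (d + 1) := by
  rw [pvLoopB]
  have hemp : frontier.isEmpty = false := by
    cases frontier with
    | nil => exact absurd rfl hne
    | cons a l => rfl
  simp only [hemp, Bool.false_eq_true, if_false, dif_pos h]

-- the bridge: running A's queue loop on a queue "frontier F at depth d, then N at depth d+1"
-- equals expanding F wholesale and continuing B-style at level d+1
theorem pvBridge (active : List (Int × Int)) :
    ∀ (n : Nat) (d : Int) (F N : List (Int × Int)) (D : PySem.Dict (Int × Int) Int),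
      2 * (F.length + N.length + pvSum D) + (if F = [] then 1 else 0) ≤ n →
      D.keys.Nodup → 0 ≤ d →
      (∀ c ∈ F, D.getD c 0 = d) → (∀ c ∈ N, D.getD c 0 = d + 1) →
      pvLoopA active D (F ++ N)
        = pvLoopB active (pvExpandAll active d F D).1 (N ++ (pvExpandAll active d F D).2) (d + 1) := by
  intro n
  induction n using Nat.strong_induction_on with
  | _ n ih =>
    intro d F N D hm hnd hd hF hN
    cases F with
    | nil =>
        have hEA : pvExpandAll active d ([] : List (Int × Int)) D = (D, []) := rfl
        rw [hEA]
        simp only [List.nil_append, List.append_nil]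
        -- goal: pvLoopA active D N = pvLoopB active D N (d + 1)
        by_cases hNe : N = []
        · rw [hNe, pvLoopA_nil, pvLoopB_nil]
        · have hNlen : 0 < N.length := List.length_pos_iff.mpr hNe
          have hmu := pvCell_fold_mu active (d + 1) (by omega) N (D, []) hnd
          rw [← pvExpandAll_eq_foldl] at hmu
          have hguard : (pvExpandAll active (d + 1) N D).2.length
              + pvSum (pvExpandAll active (d + 1) N D).1 < N.length + pvSum D := by
            have h2 := hmu.2
            simp only [List.length_nil, Nat.zero_add] at h2
            omega
          have hmN : 2 * (N.length + ([] : List (Int × Int)).length + pvSum D)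
              + (if N = [] then 1 else 0) ≤ n - 1 := by
            rw [if_neg hNe]
            rw [if_pos rfl] at hm
            simp only [List.length_nil] at *
            omega
          have hn1 : n - 1 < n := by
            rw [if_pos rfl] at hm
            omega
          have hKey := ih (n - 1) hn1 (d + 1) N [] D hmN hnd (by omega) hN
            (by intro c hc; simp at hc)
          rw [List.append_nil] at hKey
          simp only [List.nil_append] at hKey
          rw [pvLoopB_step active D N (d + 1) hNe hguard]
          have hdd : d + 1 + 1 = d + 1 + 1 := rfl
          exact hKey
    | cons c F' =>
        have hdc : D.getD c 0 = d := hF c List.mem_cons_self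
        have hmFne : (if (c :: F') = ([] : List (Int × Int)) then 1 else 0) = 0 := by
          rw [if_neg (by simp)]
        rw [hmFne] at hm
        -- the single-cell expansion from an empty accumulator
        have hmuC := pvRelax_fold_mu active d hd (pvNeighbors c) (D, []) hnd
        have hCnd : ((pvNeighbors c).foldl (pvRelax active d) (D, [])).1.keys.Nodup := hmuC.1
        have hCmu : ((pvNeighbors c).foldl (pvRelax active d) (D, [])).2.length
            + pvSum ((pvNeighbors c).foldl (pvRelax active d) (D, [])).1 ≤ pvSum D := by
          have h2 := hmuC.2
          simp only [List.length_nil, Nat.zero_add] at h2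
          exact h2
        -- loop A takes one step
        have hmuQ := pvRelax_fold_mu active d hd (pvNeighbors c) (D, F' ++ N) hnd
        have hguardA : ((pvNeighbors c).foldl (pvRelax active (D.getD c 0)) (D, F' ++ N)).2.length
            + pvSum ((pvNeighbors c).foldl (pvRelax active (D.getD c 0)) (D, F' ++ N)).1
            < (c :: (F' ++ N)).length + pvSum D := by
          rw [hdc]
          have h2 : (List.foldl (pvRelax active d) (D, F' ++ N) (pvNeighbors c)).2.length
              + pvSum (List.foldl (pvRelax active d) (D, F' ++ N) (pvNeighbors c)).1
              ≤ (F' ++ N).length + pvSum D := hmuQ.2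
          simp only [List.length_cons]
          omega
        rw [List.cons_append, pvLoopA_cons active D c (F' ++ N) hguardA, hdc,
          pvRelax_fold_acc active d (pvNeighbors c) D (F' ++ N)]
        -- IH on the remaining queue
        have hmIH : 2 * (F'.length
              + (N ++ ((pvNeighbors c).foldl (pvRelax active d) (D, [])).2).length
              + pvSum ((pvNeighbors c).foldl (pvRelax active d) (D, [])).1)
            + (if F' = [] then 1 else 0) ≤ n - 1 := by
          have hsplit : (if F' = ([] : List (Int × Int)) then 1 else 0) ≤ 1 := by
            split <;> omega
          simp only [List.length_append, List.length_cons] at *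
          omega
        have hn1 : n - 1 < n := by simp only [List.length_cons] at hm; omega
        have hF' : ∀ x ∈ F', ((pvNeighbors c).foldl (pvRelax active d) (D, [])).1.getD x 0 = d := by
          intro x hx
          have hxd : D.getD x 0 = d := hF x (List.mem_cons_of_mem _ hx)
          have := pvRelax_fold_V1 active d x (pvNeighbors c) (D, []) (by simp only []; omega)
          simpa [hxd] using this
        have hN' : ∀ x ∈ N ++ ((pvNeighbors c).foldl (pvRelax active d) (D, [])).2,
            ((pvNeighbors c).foldl (pvRelax active d) (D, [])).1.getD x 0 = d + 1 := by
          intro x hx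
          rcases List.mem_append.mp hx with h1 | h2
          · have hxd : D.getD x 0 = d + 1 := hN x h1
            have := pvRelax_fold_V1 active d x (pvNeighbors c) (D, []) (by simp only []; omega)
            simpa [hxd] using this
          · rcases pvRelax_fold_V2 active d (pvNeighbors c) (D, []) x h2 with h3 | h3
            · simp at h3
            · exact h3
        have hIH := ih (n - 1) hn1 d F'
          (N ++ ((pvNeighbors c).foldl (pvRelax active d) (D, [])).2)
          ((pvNeighbors c).foldl (pvRelax active d) (D, [])).1 hmIH hCnd hd hF' hN'
        simp only []
        rw [← List.append_assoc] at hIH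
        rw [hIH]
        -- identify the two expansion states
        have hEA : pvExpandAll active d (c :: F') D
            = ((pvExpandAll active d F' ((pvNeighbors c).foldl (pvRelax active d) (D, [])).1).1,
               ((pvNeighbors c).foldl (pvRelax active d) (D, [])).2
                 ++ (pvExpandAll active d F' ((pvNeighbors c).foldl (pvRelax active d) (D, [])).1).2) := by
          rw [pvExpandAll_eq_foldl]
          simp only [List.foldl_cons]
          have h1 : pvCell active d (D, []) c = (pvNeighbors c).foldl (pvRelax active d) (D, []) := rfl
          rw [h1, ← Prod.mk.eta (p := (pvNeighbors c).foldl (pvRelax active d) (D, [])),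
            pvCell_fold_acc active d F'
              ((pvNeighbors c).foldl (pvRelax active d) (D, [])).1
              ((pvNeighbors c).foldl (pvRelax active d) (D, [])).2,
            ← pvExpandAll_eq_foldl]
        rw [hEA, ← List.append_assoc]

-- ===== VERDICT (by name: the statement is the Claim_ definition above) =====
theorem bfs_depth_spec : Claim_equal_bfs_depth := by
  unfold Claim_equal_bfs_depth
  intro active_cells seed_cells _hdom
  unfold Spec_bfs_depth
  obtain ⟨hnd, hq⟩ := pvSeed_inv active_cells seed_cells
  have key : pvLoopA active_cells (pvSeed active_cells seed_cells).1 (pvSeed active_cells seed_cells).2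
      = pvLoopB active_cells (pvSeed active_cells seed_cells).1 (pvSeed active_cells seed_cells).2 0 := by
    by_cases hne : (pvSeed active_cells seed_cells).2 = []
    · rw [hne, pvLoopA_nil, pvLoopB_nil]
    · have hlen : 0 < (pvSeed active_cells seed_cells).2.length := List.length_pos_iff.mpr hne
      have hmu := pvCell_fold_mu active_cells 0 le_rfl (pvSeed active_cells seed_cells).2
        ((pvSeed active_cells seed_cells).1, []) hnd
      rw [← pvExpandAll_eq_foldl] at hmu
      have hguard : (pvExpandAll active_cells 0 (pvSeed active_cells seed_cells).2
            (pvSeed active_cells seed_cells).1).2.length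
          + pvSum (pvExpandAll active_cells 0 (pvSeed active_cells seed_cells).2
            (pvSeed active_cells seed_cells).1).1
          < (pvSeed active_cells seed_cells).2.length + pvSum (pvSeed active_cells seed_cells).1 := by
        have h2 := hmu.2
        simp only [List.length_nil, Nat.zero_add] at h2
        omega
      have hbr := pvBridge active_cells
        (2 * ((pvSeed active_cells seed_cells).2.length + pvSum (pvSeed active_cells seed_cells).1) + 1)
        0 (pvSeed active_cells seed_cells).2 [] (pvSeed active_cells seed_cells).1
        (by
          simp only [List.length_nil]
          split <;> omega)
        hnd le_rfl hq (by intro c hc; simp at hc)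
      rw [List.append_nil] at hbr
      simp only [List.nil_append] at hbr
      rw [pvLoopB_step active_cells (pvSeed active_cells seed_cells).1
        (pvSeed active_cells seed_cells).2 0 hne hguard]
      exact hbr
  show (pvLoopA active_cells (pvSeed active_cells seed_cells).1 (pvSeed active_cells seed_cells).2).items.map
      (fun p => (p.1.1, p.1.2, p.2))
    = (pvLoopB active_cells (pvSeed active_cells seed_cells).1 (pvSeed active_cells seed_cells).2 0).items.map
      (fun p => (p.1.1, p.1.2, p.2))
  rw [key]
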